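-- pv_equiv track=rewrite | github.com/AbdulAhad87522/Data-structure-and-algorithm | LAB/week4/2024-cs-40 lab4/main.py | radixsort
-- ===== SOURCE A (Python) =====
-- def counting_sort_by_digit(indexed_array, exp):
--     n = len(indexed_array)
--     output = [None] * n
--     count = [0] * 10
--
--     for i in range(n):
--         digit = (indexed_array[i][0] // exp) % 10
--         count[digit] += 1
--
--     for i in range(1, 10):
--         count[i] += count[i - 1]
--
--     for i in range(n - 1, -1, -1):
--         digit = (indexed_array[i][0] // exp) % 10
--         output[count[digit] - 1] = indexed_array[i]
--         count[digit] -= 1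
--
--     for i in range(n):
--         indexed_array[i] = output[i]
--
-- def radixsort(arr):
--     if len(arr) == 0:
--         return []
--
--     if any(x < 0 for x in arr):
--         raise ValueError("Radix sort only supports non-negative integers")
--
--     indexed_array = [(value, idx) for idx, value in enumerate(arr)]
--     max_val = max(val for val, _ in indexed_array)
--
--     exp = 1
--     while (max_val // exp) > 0:
--         counting_sort_by_digit(indexed_array, exp)
--         exp *= 10
--
--     return [idx for value, idx in indexed_array]
-- ===== SOURCE B (Python) =====
-- def radixsort(arr):
--     if len(arr) == 0:
--         return []
--     if any(x < 0 for x in arr):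
--         raise ValueError("Radix sort only supports non-negative integers")
--     return sorted(range(len(arr)), key=lambda i: arr[i])
-- ===== Notes on version B (the rewrite author's own statement) =====
-- stated objective: simpler
-- what changed: Replaces the per-digit counting-sort passes over an auxiliary (value, index) list with a single stable comparison sort of the indices keyed by their value (sorted(range(len(arr)), key=...)), whose stability reproduces radix sort's tie order.
import Mathlib
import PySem

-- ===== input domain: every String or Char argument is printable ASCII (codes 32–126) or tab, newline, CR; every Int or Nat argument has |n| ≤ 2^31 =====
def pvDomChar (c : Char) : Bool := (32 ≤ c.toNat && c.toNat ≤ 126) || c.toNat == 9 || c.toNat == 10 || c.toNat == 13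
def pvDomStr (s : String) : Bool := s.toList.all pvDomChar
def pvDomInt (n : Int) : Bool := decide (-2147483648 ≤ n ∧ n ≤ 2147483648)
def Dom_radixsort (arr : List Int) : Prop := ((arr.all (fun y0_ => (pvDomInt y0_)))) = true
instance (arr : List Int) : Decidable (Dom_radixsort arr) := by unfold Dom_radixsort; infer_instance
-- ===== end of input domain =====

-- B replaces A's per-digit counting-sort passes by one stable sort of the indices by value; return value only, A mutates no argument visible to the caller (its helper mutates a local list).

-- ===== PORT A =====

-- digit = (value // exp) % 10
def digitOf (v : Int) (exp : Int) : Int := PySem.Int.mod (PySem.Int.floordiv v exp) 10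

-- literal port of counting_sort_by_digit; the Python mutates its argument in place, the
-- port returns the new list.  All list indices (digit ∈ [0,10), count[digit]-1 ∈ [0,n))
-- are proved nonnegative and in range below, so `.set i.toNat` / `pyGetD` are exact here.
def countingSortByDigit (l : List (Int × Int)) (exp : Int) : List (Int × Int) :=
  let n := l.length
  let output : List (Option (Int × Int)) := List.replicate n none
  let count : List Int := List.replicate 10 0
  -- for i in range(n): count[digit] += 1
  let count := (PySem.List.pyRange 0 (n : Int) 1).foldl
    (fun cnt i =>
      let d := digitOf (PySem.List.pyGetD l i (0, 0)).1 exp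
      cnt.set d.toNat (PySem.List.pyGetD cnt d 0 + 1)) count
  -- for i in range(1, 10): count[i] += count[i-1]
  let count := (PySem.List.pyRange 1 10 1).foldl
    (fun cnt i => cnt.set i.toNat (PySem.List.pyGetD cnt i 0 + PySem.List.pyGetD cnt (i - 1) 0)) count
  -- for i in range(n-1, -1, -1): output[count[digit]-1] = l[i]; count[digit] -= 1
  let st := (PySem.List.pyRange ((n : Int) - 1) (-1) (-1)).foldl
    (fun (st : List (Option (Int × Int)) × List Int) i =>
      let p := PySem.List.pyGetD l i (0, 0)
      let d := digitOf p.1 exp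
      let pos := PySem.List.pyGetD st.2 d 0 - 1
      (st.1.set pos.toNat (some p), st.2.set d.toNat pos))
    (output, count)
  -- for i in range(n): indexed_array[i] = output[i]  (every output slot is filled, proved below)
  st.1.map (fun o => o.getD (0, 0))

-- while (max_val // exp) > 0: one pass, exp *= 10.  The guard 0 < exp only makes the
-- recursion total (every actual call has exp = 10^k); it changes no reachable computation.
def radixLoop (l : List (Int × Int)) (maxVal : Int) (exp : Int) : List (Int × Int) :=
  if h : 0 < exp ∧ 0 < PySem.Int.floordiv maxVal exp then
    radixLoop (countingSortByDigit l exp) maxVal (exp * 10)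
  else l
termination_by (maxVal + 1 - exp).toNat
decreasing_by
  have h1 : (1 : Int) ≤ PySem.Int.floordiv maxVal exp := h.2
  rw [PySem.Int.le_floordiv_iff_mul_le h.1] at h1
  omega

def radixsort (arr : List Int) : List Int :=
  if arr.length = 0 then []
  else if arr.any (fun x => decide (x < 0)) then []  -- Python raises ValueError here; excluded by Pre_
  else
    let indexed := (PySem.List.enumerate arr).map (fun iv => (iv.2, iv.1))
    let maxVal := (PySem.List.max? (indexed.map (fun p => p.1)) (fun v => v)).getD 0  -- some: list nonempty
    (radixLoop indexed maxVal 1).map (fun p => p.2)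

-- ===== PORT B =====
def radixsort_alt (arr : List Int) : List Int :=
  if arr.length = 0 then []
  else if arr.any (fun x => decide (x < 0)) then []  -- Python raises ValueError here; excluded by Pre_
  else PySem.List.sorted (PySem.List.pyRange 0 (arr.length : Int) 1)
        (fun i => PySem.List.pyGetD arr i 0) false

-- ===== PRECONDITION & SPEC =====
-- Pre_ excludes exactly the lists containing a negative value, on which A (and B) raise ValueError.
def Pre_radixsort (arr : List Int) : Prop := ∀ x ∈ arr, 0 ≤ x
instance (arr : List Int) : Decidable (Pre_radixsort arr) := by unfold Pre_radixsort; infer_instance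

def pvWitness_radixsort : List Int := [170, 45, 75, 90, 2, 802, 2, 66]

def Spec_radixsort (arr : List Int) (out : List Int) : Prop := out = radixsort_alt arr
instance (arr : List Int) (out : List Int) : Decidable (Spec_radixsort arr out) := by unfold Spec_radixsort; infer_instance

-- ===== CLAIM (what is proved, stated in full; the proofs are below) =====
def Claim_equal_radixsort : Prop := ∀ (arr : List Int), Dom_radixsort arr → Pre_radixsort arr → Spec_radixsort arr (radixsort arr)

-- ===== LEMMAS AND PROOFS =====

-- the bucket of digit d (stable: original order inside a bucket)
def filt (e : Int) (d : Nat) (l : List (Int × Int)) : List (Int × Int) :=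
  l.filter (fun p => digitOf p.1 e == (d : Int))

def bucketed (e : Int) (l : List (Int × Int)) : List (Int × Int) :=
  ((List.range 10).map (fun d => filt e d l)).flatten

lemma digit_nonneg (v e : Int) : 0 ≤ digitOf v e := by
  exact PySem.Int.mod_nonneg _ (by norm_num)

lemma digit_lt (v e : Int) : digitOf v e < 10 := by
  exact PySem.Int.mod_lt _ (by norm_num)

-- the digit test as a Nat equation
lemma filt_test (p : Int × Int) (e : Int) (d : Nat) :
    (digitOf p.1 e == (d : Int)) = ((digitOf p.1 e).toNat == d) := by
  have h0 := digit_nonneg p.1 e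
  by_cases h : digitOf p.1 e = (d : Int)
  · simp [h]
  · have : (digitOf p.1 e).toNat ≠ d := by omega
    simp [h, this]

-- v % (e*10) = ((v//e) % 10) * e + v % e   for 0 < e
lemma mod_split (v e : Int) (he : 0 < e) :
    PySem.Int.mod v (e * 10) = digitOf v e * e + PySem.Int.mod v e := by
  have h10 : (0:Int) < e * 10 := by positivity
  rw [PySem.Int.mod_eq_emod_of_pos h10, PySem.Int.mod_eq_emod_of_pos he]
  unfold digitOf
  rw [PySem.Int.mod_eq_emod_of_pos (by norm_num), PySem.Int.floordiv_eq_ediv_of_pos he]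
  have h4 : v / e / 10 = v / (e * 10) := Int.ediv_ediv_of_nonneg (le_of_lt he)
  have h1 : v % (e * 10) = v - e * 10 * (v / (e * 10)) := by rw [Int.emod_def]
  have h2 : v % e = v - e * (v / e) := by rw [Int.emod_def]
  have h3 : (v / e) % 10 = v / e - 10 * (v / e / 10) := by rw [Int.emod_def]
  rw [h1, h2, h3, h4]; ring

def CC (e : Int) (d : Nat) (l : List (Int × Int)) : Nat := (filt e d l).length

def offF (e : Int) (l : List (Int × Int)) (d : Nat) : Nat :=
  ((List.range d).map (fun d' => CC e d' l)).sum

def revStep (e : Int) (st : List (Option (Int × Int)) × List Int) (p : Int × Int) :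
    List (Option (Int × Int)) × List Int :=
  let d := digitOf p.1 e
  let pos := PySem.List.pyGetD st.2 d 0 - 1
  (st.1.set pos.toNat (some p), st.2.set d.toNat pos)

lemma CC_cons (e : Int) (x : Int × Int) (l : List (Int × Int)) (d : Nat) :
    CC e d (x :: l) = (if (digitOf x.1 e).toNat = d then 1 else 0) + CC e d l := by
  unfold CC filt
  rw [List.filter_cons, filt_test]
  by_cases h : (digitOf x.1 e).toNat = d <;> simp [h] <;> omega

lemma CC_snoc (e : Int) (p : Int × Int) (l : List (Int × Int)) (d : Nat) :
    CC e d (l ++ [p]) = CC e d (l) + (if (digitOf p.1 e).toNat = d then 1 else 0) := by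
  unfold CC filt
  rw [List.filter_append, List.length_append, List.filter_cons, filt_test]
  by_cases h : (digitOf p.1 e).toNat = d <;> simp [h]

lemma filt_snoc (e : Int) (p : Int × Int) (l : List (Int × Int)) (d : Nat) :
    filt e d (l ++ [p]) = filt e d l ++ (if (digitOf p.1 e).toNat = d then [p] else []) := by
  unfold filt
  rw [List.filter_append, List.filter_cons, filt_test]
  by_cases h : (digitOf p.1 e).toNat = d <;> simp [h]

lemma offF_succ (e : Int) (l : List (Int × Int)) (d : Nat) :
    offF e l (d + 1) = offF e l d + CC e d l := by
  unfold offF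
  rw [List.range_succ]
  simp

lemma sum_ite_zero (k : Nat) : ∀ n : Nat,
    ((List.range n).map (fun d => if k = d then 1 else 0)).sum = if k < n then 1 else 0 := by
  intro n
  induction n with
  | zero => simp
  | succ m ih =>
    rw [List.range_succ]
    simp only [List.map_append, List.sum_append, List.map_cons, List.map_nil]
    rw [ih]
    by_cases h1 : k < m
    · have h2 : k ≠ m := by omega
      simp [h1, h2, (by omega : k < m + 1)]
    · by_cases h2 : k = m
      · simp [h1, h2]
      · have : ¬ k < m + 1 := by omega
        simp [h1, h2, this]

lemma sum_CC (e : Int) (l : List (Int × Int)) :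
    ((List.range 10).map (fun d => CC e d l)).sum = l.length := by
  induction l with
  | nil => simp [CC, filt]
  | cons x l ih =>
    have hlt : (digitOf x.1 e).toNat < 10 := by
      have h0 := digit_nonneg x.1 e
      have h9 := digit_lt x.1 e
      omega
    calc ((List.range 10).map (fun d => CC e d (x :: l))).sum
        = ((List.range 10).map (fun d =>
            (if (digitOf x.1 e).toNat = d then 1 else 0) + CC e d l)).sum := by
          exact congrArg _ (List.map_congr_left (fun d _ => CC_cons e x l d))
      _ = ((List.range 10).map (fun d => if (digitOf x.1 e).toNat = d then 1 else 0)).sum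
            + ((List.range 10).map (fun d => CC e d l)).sum := List.sum_map_add
      _ = (x :: l).length := by rw [sum_ite_zero, ih, if_pos hlt]; simp; omega

lemma list10_expand (c : List Int) (h : c.length = 10) :
    ∃ a0 a1 a2 a3 a4 a5 a6 a7 a8 a9 : Int, c = [a0,a1,a2,a3,a4,a5,a6,a7,a8,a9] := by
  rcases c with _|⟨a0,c⟩; · simp at h
  rcases c with _|⟨a1,c⟩; · simp at h
  rcases c with _|⟨a2,c⟩; · simp at h
  rcases c with _|⟨a3,c⟩; · simp at h
  rcases c with _|⟨a4,c⟩; · simp at h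
  rcases c with _|⟨a5,c⟩; · simp at h
  rcases c with _|⟨a6,c⟩; · simp at h
  rcases c with _|⟨a7,c⟩; · simp at h
  rcases c with _|⟨a8,c⟩; · simp at h
  rcases c with _|⟨a9,c⟩; · simp at h
  have hc : c = [] := by
    have : c.length = 0 := by simpa using h
    simpa [List.length_eq_zero_iff] using this
  subst hc
  exact ⟨a0,a1,a2,a3,a4,a5,a6,a7,a8,a9, rfl⟩

-- the prefix-sum loop on a 10-element list, computed
lemma prefix_loop (a0 a1 a2 a3 a4 a5 a6 a7 a8 a9 : Int) :
    (PySem.List.pyRange 1 10 1).foldl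
      (fun cnt i => cnt.set i.toNat (PySem.List.pyGetD cnt i 0 + PySem.List.pyGetD cnt (i - 1) 0))
      [a0,a1,a2,a3,a4,a5,a6,a7,a8,a9] =
    [a0, a1+a0, a2+(a1+a0), a3+(a2+(a1+a0)), a4+(a3+(a2+(a1+a0))),
     a5+(a4+(a3+(a2+(a1+a0)))), a6+(a5+(a4+(a3+(a2+(a1+a0))))),
     a7+(a6+(a5+(a4+(a3+(a2+(a1+a0)))))), a8+(a7+(a6+(a5+(a4+(a3+(a2+(a1+a0))))))),
     a9+(a8+(a7+(a6+(a5+(a4+(a3+(a2+(a1+a0))))))))] := rfl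

lemma foldl_pyRange_idx {β : Type} (l : List (Int × Int)) (g : β → (Int × Int) → β) (init : β) :
    (PySem.List.pyRange 0 (l.length : Int) 1).foldl
      (fun acc i => g acc (PySem.List.pyGetD l i (0,0))) init = l.foldl g init := by
  conv_rhs => rw [← PySem.List.map_pyGetD_pyRange_zero l (0,0)]
  rw [List.foldl_map]
  rfl

lemma pyRange_rev_map (l : List (Int × Int)) :
    (PySem.List.pyRange ((l.length : Int) - 1) (-1) (-1)).map
      (fun i => PySem.List.pyGetD l i (0,0)) = l.reverse := by
  by_cases hl : l = []
  · subst hl; rfl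
  · have hpos : 0 < l.length := List.length_pos_iff.mpr hl
    have hpos' : 1 ≤ (l.length : Int) := by exact_mod_cast hpos
    have hr : PySem.List.pyRange ((l.length : Int) - 1) (-1) (-1) =
        (List.range l.length).map (fun k : Nat => (l.length : Int) - 1 - (k : Int)) := by
      unfold PySem.List.pyRange
      rw [if_neg (show ¬ (-1 : Int) = 0 by norm_num)]
      have hc1 : ¬ (0:Int) < -1 := by norm_num
      have hc2 : (-1 : Int) < (l.length : Int) - 1 := by omega
      rw [if_neg hc1, if_pos hc2]
      have harith : ((l.length : Int) - 1 - (-1) + - -1 - 1) = (l.length : Int) := by ring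
      rw [harith, show (- -1 : Int) = 1 from by norm_num, Int.ediv_one, Int.toNat_natCast]
      show List.map (fun k : Nat => (l.length : Int) - 1 + -1 * (k : Int)) (List.range l.length) = _
      apply List.map_congr_left
      intro k _
      ring
    rw [hr, List.map_map]
    apply List.ext_getElem
    · simp
    · intro i h1 h2
      simp only [List.getElem_map, List.getElem_range, Function.comp_apply, List.getElem_reverse]
      have hi : i < l.length := by simpa using h1
      have hcast : (l.length : Int) - 1 - (i : Int) = ((l.length - 1 - i : Nat) : Int) := by omega
      rw [hcast, PySem.List.pyGetD_natCast]
      rw [List.getD_eq_getElem l (0,0) (by omega)]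

lemma getD_set_self (c : List Int) (i : Nat) (v : Int) (h : i < c.length) :
    (c.set i v).getD i 0 = v := by
  rw [List.getD_eq_getElem?_getD, List.getElem?_set_self h]; rfl

lemma getD_set_ne (c : List Int) (i j : Nat) (v : Int) (h : i ≠ j) :
    (c.set i v).getD j 0 = c.getD j 0 := by
  rw [List.getD_eq_getElem?_getD, List.getElem?_set_ne h, ← List.getD_eq_getElem?_getD]

lemma count_loop (e : Int) :
    ∀ (l : List (Int × Int)) (c : List Int), c.length = 10 →
    (l.foldl (fun cnt p =>
        cnt.set (digitOf p.1 e).toNat (PySem.List.pyGetD cnt (digitOf p.1 e) 0 + 1)) c).length = 10 ∧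
    (∀ d : Nat, d < 10 →
      (l.foldl (fun cnt p =>
        cnt.set (digitOf p.1 e).toNat (PySem.List.pyGetD cnt (digitOf p.1 e) 0 + 1)) c).getD d 0
        = c.getD d 0 + (CC e d l : Int)) := by
  intro l
  induction l with
  | nil => intro c hc; exact ⟨hc, fun d _ => by simp [CC, filt]⟩
  | cons x l ih =>
    intro c hc
    have h0 := digit_nonneg x.1 e
    have h9 := digit_lt x.1 e
    set dg := (digitOf x.1 e).toNat with hdg
    have hdglt : dg < 10 := by omega
    have hread : PySem.List.pyGetD c (digitOf x.1 e) 0 = c.getD dg 0 := by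
      rw [PySem.List.pyGetD_of_nonneg c 0 h0]
    simp only [List.foldl_cons, hread]
    set c' := c.set dg (c.getD dg 0 + 1) with hc'
    have hc'len : c'.length = 10 := by rw [hc', List.length_set, hc]
    obtain ⟨ihlen, ihval⟩ := ih c' hc'len
    refine ⟨ihlen, ?_⟩
    intro d hd
    rw [ihval d hd]
    rw [CC_cons]
    by_cases hdd : dg = d
    · subst hdd
      rw [hc', getD_set_self c dg _ (by omega), if_pos rfl]
      push_cast; ring
    · rw [hc', getD_set_ne c dg d _ hdd, if_neg hdd]
      push_cast; ring

-- interval layout chain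
lemma off_chain (off : Nat → Nat) (Cm : Nat → Nat)
    (hstep : ∀ d : Nat, d < 9 → off d + Cm d ≤ off (d + 1)) :
    ∀ d d' : Nat, d < d' → d' ≤ 9 → off d + Cm d ≤ off d' := by
  intro d d' hlt hle
  induction d' with
  | zero => omega
  | succ m ihm =>
    by_cases hm : d < m
    · have := ihm (by omega) (by omega)
      have := hstep m (by omega)
      omega
    · have hdm : d = m := by omega
      subst hdm
      exact hstep d (by omega)

lemma revplace (e : Int) :
    ∀ (M : List (Int × Int)) (out : List (Option (Int × Int))) (cnt : List Int) (off : Nat → Nat),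
    cnt.length = 10 →
    (∀ d : Nat, d < 10 → cnt.getD d 0 = ((off d + CC e d M : Nat) : Int)) →
    (∀ d : Nat, d < 9 → off d + CC e d M ≤ off (d + 1)) →
    off 9 + CC e 9 M ≤ out.length →
    (M.reverse.foldl (revStep e) (out, cnt)).1.length = out.length ∧
    (∀ j : Nat, (∀ d : Nat, d < 10 → j < off d ∨ off d + CC e d M ≤ j) →
      (M.reverse.foldl (revStep e) (out, cnt)).1[j]? = out[j]?) ∧
    (∀ d : Nat, d < 10 → ∀ (k : Nat) (q : Int × Int), (filt e d M)[k]? = some q →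
      (M.reverse.foldl (revStep e) (out, cnt)).1[(off d + k)]? = some (some q)) := by
  intro M
  induction M using List.reverseRecOn with
  | nil =>
    intro out cnt off h1 h2 h3 h4
    refine ⟨rfl, fun j _ => rfl, ?_⟩
    intro d hd k q hq
    simp [filt] at hq
  | append_singleton M₀ p ih =>
    intro out cnt off h1 h2 h3 h4
    have h0 := digit_nonneg p.1 e
    have h9 := digit_lt p.1 e
    set d₀ := (digitOf p.1 e).toNat with hd₀
    have hd₀lt : d₀ < 10 := by omega
    have hCCs : ∀ d : Nat, CC e d (M₀ ++ [p]) = CC e d M₀ + (if d₀ = d then 1 else 0) :=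
      fun d => CC_snoc e p M₀ d
    -- one step of the loop
    have hfold : (M₀ ++ [p]).reverse.foldl (revStep e) (out, cnt)
        = M₀.reverse.foldl (revStep e) (revStep e (out, cnt) p) := by
      rw [List.reverse_append]; rfl
    have hread : PySem.List.pyGetD cnt (digitOf p.1 e) 0 = cnt.getD d₀ 0 := by
      rw [PySem.List.pyGetD_of_nonneg cnt 0 h0]
    set posN : Nat := off d₀ + CC e d₀ M₀ with hposN
    have hcntd₀ : cnt.getD d₀ 0 = ((posN + 1 : Nat) : Int) := by
      rw [h2 d₀ hd₀lt, hCCs d₀, if_pos rfl, hposN]; push_cast; ring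
    have hstepeq : revStep e (out, cnt) p = (out.set posN (some p), cnt.set d₀ ((posN : Nat) : Int)) := by
      unfold revStep
      simp only [hread, hcntd₀]
      have hsub : ((posN + 1 : Nat) : Int) - 1 = ((posN : Nat) : Int) := by push_cast; ring
      rw [hsub, Int.toNat_natCast]
    rw [hfold, hstepeq]
    -- bounds on intervals
    have hchainM : ∀ d d' : Nat, d < d' → d' ≤ 9 → off d + CC e d (M₀ ++ [p]) ≤ off d' :=
      off_chain off (fun d => CC e d (M₀ ++ [p])) h3
    have hCC0le : ∀ d : Nat, CC e d M₀ ≤ CC e d (M₀ ++ [p]) := by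
      intro d; rw [hCCs d]; omega
    have hposlt : posN < off d₀ + CC e d₀ (M₀ ++ [p]) := by
      rw [hCCs d₀, if_pos rfl]; omega
    have hposbound : posN < out.length := by
      by_cases h99 : d₀ = 9
      · have ha := hCC0le 9
        rw [h99] at hposN hposlt
        omega
      · have hb := hchainM d₀ 9 (by omega) (by omega)
        omega
    -- apply the induction hypothesis
    obtain ⟨ihlen, ihout, ihseg⟩ := ih (out.set posN (some p)) (cnt.set d₀ ((posN : Nat) : Int)) off
      (by rw [List.length_set]; exact h1)
      (by
        intro d hd
        by_cases hdd : d₀ = d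
        · subst hdd; rw [getD_set_self _ _ _ (by omega)]
        · rw [getD_set_ne _ _ _ _ hdd, h2 d hd, hCCs d, if_neg hdd]; push_cast; ring)
      (by intro d hd; have := h3 d hd; have := hCC0le d; omega)
      (by rw [List.length_set]; have := hCC0le 9; omega)
    have houtlen : (out.set posN (some p)).length = out.length := List.length_set ..
    refine ⟨by rw [ihlen, houtlen], ?_, ?_⟩
    · -- untouched positions
      intro j hj
      have hj0 : ∀ d : Nat, d < 10 → j < off d ∨ off d + CC e d M₀ ≤ j := by
        intro d hd
        rcases hj d hd with h | h
        · exact Or.inl h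
        · exact Or.inr (by have := hCC0le d; omega)
      rw [ihout j hj0]
      have hne : posN ≠ j := by
        rcases hj d₀ hd₀lt with h | h
        · omega
        · omega
      exact List.getElem?_set_ne hne
    · -- the filled segments
      intro d hd k q hq
      by_cases hdd : d₀ = d
      · subst hdd
        rw [filt_snoc, if_pos rfl] at hq
        by_cases hk : k < CC e d₀ M₀
        · rw [List.getElem?_append_left (by exact hk)] at hq
          exact ihseg d₀ hd₀lt k q hq
        · -- k is the last slot of the d₀ bucket
          have hlen1 : (filt e d₀ M₀).length = CC e d₀ M₀ := rfl
          have hklen : k = CC e d₀ M₀ := by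
            by_contra hne
            have hge : (filt e d₀ M₀ ++ [p]).length ≤ k := by
              simp only [List.length_append, List.length_cons, List.length_nil, hlen1]
              omega
            rw [List.getElem?_eq_none hge] at hq
            simp at hq
          have hqp : q = p := by
            rw [List.getElem?_append_right (by rw [hlen1]; omega)] at hq
            rw [hlen1, hklen] at hq
            simp at hq
            exact hq.symm
          subst hqp
          have hout : ∀ d' : Nat, d' < 10 → posN < off d' ∨ off d' + CC e d' M₀ ≤ posN := by
            intro d' hd'
            by_cases h1' : d' = d₀
            · subst h1'; exact Or.inr (by omega)
            · by_cases h2' : d' < d₀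
              · refine Or.inr ?_
                have := hchainM d' d₀ (by omega) (by omega)
                have := hCC0le d'
                omega
              · refine Or.inl ?_
                have := hchainM d₀ d' (by omega) (by omega)
                omega
          have := ihout posN hout
          rw [hklen, ← hposN, this, List.getElem?_set_self hposbound]
      · rw [filt_snoc, if_neg hdd, List.append_nil] at hq
        exact ihseg d hd k q hq

-- reading the filled output back: segments tiling the list
lemma seg_extract :
    ∀ (segs : List (List (Int × Int))) (out : List (Option (Int × Int))),
    out.length = segs.flatten.length →
    (∀ (i : Nat) (seg : List (Int × Int)), segs[i]? = some seg →
      ∀ (k : Nat) (q : Int × Int), seg[k]? = some q →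
        out[(((segs.take i).map List.length).sum + k)]? = some (some q)) →
    out.map (fun o => o.getD (0,0)) = segs.flatten := by
  intro segs
  induction segs with
  | nil => intro out h1 _; simp at h1; simp [h1]
  | cons s rest ih =>
    intro out h1 h2
    have hslen : s.length ≤ out.length := by simp [h1]
    have hsplit : out = out.take s.length ++ out.drop s.length := (List.take_append_drop _ _).symm
    have htake : out.take s.length = s.map some := by
      apply List.ext_getElem?
      intro k
      rw [List.getElem?_take]
      by_cases hk : k < s.length
      · rw [if_pos hk, List.getElem?_map, List.getElem?_eq_getElem hk]
        have := h2 0 s rfl k (s[k]) (List.getElem?_eq_getElem hk)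
        simpa using this
      · rw [if_neg hk, List.getElem?_eq_none (l := s.map some) (by simp; omega)]
    have hdrop : (out.drop s.length).map (fun o => o.getD (0,0)) = rest.flatten := by
      apply ih
      · simp [h1]
      · intro i seg hseg k q hq
        rw [List.getElem?_drop]
        have := h2 (i + 1) seg (by simpa using hseg) k q hq
        have harr : s.length + (((rest.take i).map List.length).sum + k)
            = ((List.take (i + 1) (s :: rest)).map List.length).sum + k := by
          simp [List.take_succ_cons]
          omega
        rw [harr]
        exact this
    rw [hsplit, List.map_append, htake, hdrop, List.flatten_cons]
    congr 1
    rw [List.map_map]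
    simp

lemma foldl_pyRange_rev {β : Type} (l : List (Int × Int)) (g : β → (Int × Int) → β) (init : β) :
    (PySem.List.pyRange ((l.length : Int) - 1) (-1) (-1)).foldl
      (fun acc i => g acc (PySem.List.pyGetD l i (0,0))) init = l.reverse.foldl g init := by
  conv_rhs => rw [← pyRange_rev_map l]
  rw [List.foldl_map]

lemma count_fold_conv (l : List (Int × Int)) (e : Int) (init : List Int) :
    (PySem.List.pyRange 0 (l.length : Int) 1).foldl
      (fun cnt i => cnt.set (digitOf (PySem.List.pyGetD l i (0,0)).1 e).toNat
          (PySem.List.pyGetD cnt (digitOf (PySem.List.pyGetD l i (0,0)).1 e) 0 + 1)) init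
    = l.foldl (fun cnt p => cnt.set (digitOf p.1 e).toNat
        (PySem.List.pyGetD cnt (digitOf p.1 e) 0 + 1)) init :=
  foldl_pyRange_idx l (fun cnt p => cnt.set (digitOf p.1 e).toNat
    (PySem.List.pyGetD cnt (digitOf p.1 e) 0 + 1)) init

lemma csd_eq_bucketed (l : List (Int × Int)) (e : Int) (_he : 0 < e) :
    countingSortByDigit l e = bucketed e l := by
  -- name the three loops
  have h0 : countingSortByDigit l e =
      (let c1 := (PySem.List.pyRange 0 (l.length : Int) 1).foldl
          (fun cnt i => (fun (cnt : List Int) (p : Int × Int) =>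
            cnt.set (digitOf p.1 e).toNat (PySem.List.pyGetD cnt (digitOf p.1 e) 0 + 1))
            cnt (PySem.List.pyGetD l i (0,0))) (List.replicate 10 (0 : Int))
       let c2 := (PySem.List.pyRange 1 10 1).foldl
          (fun cnt i => cnt.set i.toNat (PySem.List.pyGetD cnt i 0 + PySem.List.pyGetD cnt (i - 1) 0)) c1
       let st := (PySem.List.pyRange ((l.length : Int) - 1) (-1) (-1)).foldl
          (fun acc i => revStep e acc (PySem.List.pyGetD l i (0,0)))
          (List.replicate l.length (none : Option (Int × Int)), c2)
       st.1.map (fun o => o.getD (0,0))) := rfl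
  rw [h0]
  simp only [foldl_pyRange_rev]
  rw [count_fold_conv l e]
  -- the count array after the first loop
  obtain ⟨hc1len, hc1val⟩ := count_loop e l (List.replicate 10 (0 : Int)) (by simp)
  set c1 := l.foldl (fun cnt p =>
      cnt.set (digitOf p.1 e).toNat (PySem.List.pyGetD cnt (digitOf p.1 e) 0 + 1))
      (List.replicate 10 (0 : Int)) with hc1
  have hA : ∀ d : Nat, d < 10 → c1.getD d 0 = (CC e d l : Int) := by
    intro d hd
    rw [hc1val d hd, List.getD_replicate 0 hd]
    omega
  -- the prefix sums
  obtain ⟨a0,a1,a2,a3,a4,a5,a6,a7,a8,a9,hc1e⟩ := list10_expand c1 hc1len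
  have hAi : ∀ i : Fin 10, [a0,a1,a2,a3,a4,a5,a6,a7,a8,a9].getD i.1 0 = (CC e i.1 l : Int) := by
    intro i
    rw [← hc1e]
    exact hA i.1 i.2
  rw [hc1e, prefix_loop]
  set c2 := [a0, a1+a0, a2+(a1+a0), a3+(a2+(a1+a0)), a4+(a3+(a2+(a1+a0))),
     a5+(a4+(a3+(a2+(a1+a0)))), a6+(a5+(a4+(a3+(a2+(a1+a0))))),
     a7+(a6+(a5+(a4+(a3+(a2+(a1+a0)))))), a8+(a7+(a6+(a5+(a4+(a3+(a2+(a1+a0))))))),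
     a9+(a8+(a7+(a6+(a5+(a4+(a3+(a2+(a1+a0))))))))] with hc2
  have ha : ∀ i : Fin 10, [a0,a1,a2,a3,a4,a5,a6,a7,a8,a9].getD i.1 0 =
      [a0,a1,a2,a3,a4,a5,a6,a7,a8,a9].getD i.1 0 := fun _ => rfl
  have hA0 := hAi ⟨0, by omega⟩
  have hA1 := hAi ⟨1, by omega⟩
  have hA2 := hAi ⟨2, by omega⟩
  have hA3 := hAi ⟨3, by omega⟩
  have hA4 := hAi ⟨4, by omega⟩
  have hA5 := hAi ⟨5, by omega⟩
  have hA6 := hAi ⟨6, by omega⟩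
  have hA7 := hAi ⟨7, by omega⟩
  have hA8 := hAi ⟨8, by omega⟩
  have hA9 := hAi ⟨9, by omega⟩
  simp only [List.getD_cons_zero, List.getD_cons_succ] at hA0 hA1 hA2 hA3 hA4 hA5 hA6 hA7 hA8 hA9
  have hoff0 : offF e l 0 = 0 := by simp [offF]
  have ho1 : offF e l 1 = offF e l 0 + CC e 0 l := by simpa using offF_succ e l 0
  have ho2 : offF e l 2 = offF e l 1 + CC e 1 l := by simpa using offF_succ e l 1
  have ho3 : offF e l 3 = offF e l 2 + CC e 2 l := by simpa using offF_succ e l 2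
  have ho4 : offF e l 4 = offF e l 3 + CC e 3 l := by simpa using offF_succ e l 3
  have ho5 : offF e l 5 = offF e l 4 + CC e 4 l := by simpa using offF_succ e l 4
  have ho6 : offF e l 6 = offF e l 5 + CC e 5 l := by simpa using offF_succ e l 5
  have ho7 : offF e l 7 = offF e l 6 + CC e 6 l := by simpa using offF_succ e l 6
  have ho8 : offF e l 8 = offF e l 7 + CC e 7 l := by simpa using offF_succ e l 7
  have ho9 : offF e l 9 = offF e l 8 + CC e 8 l := by simpa using offF_succ e l 8
  -- c2 entries = offF + CC
  have hc2val : ∀ d : Nat, d < 10 → c2.getD d 0 = ((offF e l d + CC e d l : Nat) : Int) := by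
    intro d hd
    interval_cases d <;>
      · simp only [hc2, List.getD_cons_zero, List.getD_cons_succ]
        push_cast
        omega
  -- apply the reverse placement invariant
  obtain ⟨hrlen, _, hrseg⟩ := revplace e l (List.replicate l.length none) c2 (offF e l)
    (by rw [hc2]; rfl)
    hc2val
    (fun d _ => le_of_eq (offF_succ e l d).symm)
    (by
      rw [List.length_replicate]
      refine le_of_eq ?_
      have h10 : offF e l 9 + CC e 9 l = offF e l 10 := (offF_succ e l 9).symm
      rw [h10]
      exact sum_CC e l)
  show (l.reverse.foldl (revStep e) (List.replicate l.length none, c2)).1.map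
      (fun o => o.getD (0,0)) = ((List.range 10).map (fun d => filt e d l)).flatten
  apply seg_extract
  · rw [hrlen, List.length_replicate, List.length_flatten, List.map_map]
    exact (sum_CC e l).symm
  · intro i seg hseg k q hq
    have hi : i < 10 := by
      by_contra hc
      rw [List.getElem?_eq_none (by simp; omega)] at hseg
      simp at hseg
    rw [List.getElem?_map, List.getElem?_range hi] at hseg
    simp only [Option.map_some] at hseg
    have hseg' : seg = filt e i l := by injection hseg with h; exact h.symm
    subst hseg'
    have hoffset : ((((List.range 10).map (fun d => filt e d l)).take i).map List.length).sum
        = offF e l i := by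
      rw [← List.map_take, List.take_range, show min i 10 = i from by omega, List.map_map]
      rfl
    rw [hoffset]
    exact hrseg i hi k q hq

lemma flatten_filt_cons (e : Int) (x : Int × Int) (l : List (Int × Int)) :
    ∀ (ds : List Nat), ds.Nodup → (digitOf x.1 e).toNat ∈ ds →
    ((ds.map (fun d => filt e d (x :: l))).flatten).Perm
      (x :: (ds.map (fun d => filt e d l)).flatten) := by
  intro ds
  induction ds with
  | nil => intro _ h; simp at h
  | cons d ds ih =>
    intro hnd hmem
    have hfc : ∀ d' : Nat, filt e d' (x :: l) =
        (if (digitOf x.1 e).toNat = d' then x :: filt e d' l else filt e d' l) := by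
      intro d'
      unfold filt
      rw [List.filter_cons, filt_test]
      by_cases h : (digitOf x.1 e).toNat = d'
      · simp [h]
      · simp [h]
    by_cases hd : (digitOf x.1 e).toNat = d
    · have hrest : ∀ d' ∈ ds, filt e d' (x :: l) = filt e d' l := by
        intro d' hd'
        rw [hfc d']
        have : (digitOf x.1 e).toNat ≠ d' := by
          rintro rfl; exact (List.nodup_cons.mp hnd).1 (hd ▸ hd')
        simp [this]
      simp only [List.map_cons, List.flatten_cons, hfc d, if_pos hd]
      rw [List.map_congr_left hrest]
      simp
    · have hmem' : (digitOf x.1 e).toNat ∈ ds := by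
        rcases List.mem_cons.mp hmem with h | h
        · exact absurd h hd
        · exact h
      have ihp := ih (List.nodup_cons.mp hnd).2 hmem'
      simp only [List.map_cons, List.flatten_cons, hfc d, if_neg hd]
      exact (ihp.append_left (filt e d l)).trans List.perm_middle


lemma bucketed_perm (l : List (Int × Int)) (e : Int) :
    (bucketed e l).Perm l := by
  induction l with
  | nil => simp [bucketed, filt]
  | cons x l ih =>
    have h1 := flatten_filt_cons e x l (List.range 10) (List.nodup_range)
      (by
        have h0 := digit_nonneg x.1 e
        have h9 := digit_lt x.1 e
        exact List.mem_range.mpr (by omega))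
    exact h1.trans (ih.cons x)

def lexE (E : Int) (p q : Int × Int) : Prop :=
  PySem.Int.mod p.1 E < PySem.Int.mod q.1 E ∨
    (PySem.Int.mod p.1 E = PySem.Int.mod q.1 E ∧ p.2 < q.2)

lemma mem_filt {e : Int} {d : Nat} {l : List (Int × Int)} {p : Int × Int}
    (h : p ∈ filt e d l) : p ∈ l ∧ digitOf p.1 e = (d : Int) := by
  unfold filt at h
  have h' := List.mem_filter.mp h
  exact ⟨h'.1, by simpa using h'.2⟩

lemma bucketed_pairwise (l : List (Int × Int)) (e : Int) (he : 0 < e)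
    (h : l.Pairwise (lexE e)) : (bucketed e l).Pairwise (lexE (e * 10)) := by
  unfold bucketed
  rw [List.pairwise_flatten]
  constructor
  · intro lb hlb
    rcases List.mem_map.mp hlb with ⟨d, _, rfl⟩
    have hpf : (filt e d l).Pairwise (lexE e) := List.Pairwise.filter _ h
    refine hpf.imp_of_mem ?_
    intro a b ha hb hab
    have hda := (mem_filt ha).2
    have hdb := (mem_filt hb).2
    unfold lexE at hab ⊢
    rw [mod_split a.1 e he, mod_split b.1 e he, hda, hdb]
    rcases hab with h1 | ⟨h1, h2⟩
    · exact Or.inl (by linarith)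
    · exact Or.inr ⟨by rw [h1], h2⟩
  · rw [List.pairwise_map]
    refine List.pairwise_lt_range.imp_of_mem ?_
    intro d1 d2 hd1 hd2 hlt x hx y hy
    have hdx := (mem_filt hx).2
    have hdy := (mem_filt hy).2
    unfold lexE
    rw [mod_split x.1 e he, mod_split y.1 e he, hdx, hdy]
    have h1 : PySem.Int.mod x.1 e < e := PySem.Int.mod_lt _ he
    have h2 : (0:Int) ≤ PySem.Int.mod y.1 e := PySem.Int.mod_nonneg _ he
    have h3 : ((d1:Int) + 1) * e ≤ (d2:Int) * e :=
      mul_le_mul_of_nonneg_right (by exact_mod_cast hlt) (le_of_lt he)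
    exact Or.inl (by nlinarith)

def lexF (p q : Int × Int) : Prop := p.1 < q.1 ∨ (p.1 = q.1 ∧ p.2 < q.2)

lemma radixLoop_spec : ∀ (l : List (Int × Int)) (maxVal exp : Int), 0 < exp →
    (∀ p ∈ l, 0 ≤ p.1 ∧ p.1 ≤ maxVal) → l.Pairwise (lexE exp) →
    (radixLoop l maxVal exp).Perm l ∧ (radixLoop l maxVal exp).Pairwise lexF := by
  intro l maxVal exp
  induction l, exp using radixLoop.induct maxVal with
  | case1 l exp h ih =>
    intro he hb hp
    rw [radixLoop, dif_pos h]
    have hcb : countingSortByDigit l exp = bucketed exp l := csd_eq_bucketed l exp he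
    have hperm : (countingSortByDigit l exp).Perm l := hcb ▸ bucketed_perm l exp
    have hb' : ∀ p ∈ countingSortByDigit l exp, 0 ≤ p.1 ∧ p.1 ≤ maxVal := by
      intro p hpmem; exact hb p (hperm.mem_iff.mp hpmem)
    have hp' : (countingSortByDigit l exp).Pairwise (lexE (exp * 10)) := by
      rw [hcb]; exact bucketed_pairwise l exp he hp
    have := ih (by positivity) hb' hp'
    exact ⟨this.1.trans hperm, this.2⟩
  | case2 l exp h =>
    intro he hb hp
    rw [radixLoop, dif_neg h]
    have hflt : PySem.Int.floordiv maxVal exp < 1 := by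
      by_contra hc
      exact h ⟨he, by omega⟩
    rw [PySem.Int.floordiv_lt_iff_lt_mul he] at hflt
    refine ⟨List.Perm.refl l, hp.imp_of_mem ?_⟩
    intro a b ha hb'
    have hma : PySem.Int.mod a.1 exp = a.1 := by
      rw [PySem.Int.mod_eq_emod_of_pos he]
      exact Int.emod_eq_of_lt (hb a ha).1 (by have := (hb a ha).2; omega)
    have hmb : PySem.Int.mod b.1 exp = b.1 := by
      rw [PySem.Int.mod_eq_emod_of_pos he]
      exact Int.emod_eq_of_lt (hb b hb').1 (by have := (hb b hb').2; omega)
    unfold lexE lexF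
    rw [hma, hmb]
    exact id

-- stability of PySem.List.sorted on a strictly increasing input list
lemma insertBy_pairwise (key : Int → Int) (x : Int) :
    ∀ (acc : List Int),
      acc.Pairwise (fun a b => key a < key b ∨ (key a = key b ∧ a < b)) →
      (∀ a ∈ acc, a < x) →
      (PySem.List.insertBy (fun a b => decide (key a < key b)) x acc).Pairwise
        (fun a b => key a < key b ∨ (key a = key b ∧ a < b)) := by
  intro acc
  induction acc with
  | nil =>
    intro _ _
    have : PySem.List.insertBy (fun a b => decide (key a < key b)) x [] = [x] := rfl
    rw [this]
    simp
  | cons y ys ih =>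
    intro hp hlt
    have hstep : PySem.List.insertBy (fun a b => decide (key a < key b)) x (y :: ys) =
        if key x < key y then x :: y :: ys
        else y :: PySem.List.insertBy (fun a b => decide (key a < key b)) x ys := by
      show (if decide (key x < key y) = true then _ else _) = _
      by_cases hk : key x < key y <;> simp [hk]
    rw [hstep]
    by_cases hk : key x < key y
    · rw [if_pos hk]
      refine List.Pairwise.cons ?_ hp
      intro z hz
      rcases List.mem_cons.mp hz with rfl | hz'
      · exact Or.inl hk
      · rcases List.rel_of_pairwise_cons hp hz' with h1 | ⟨h1, _⟩
        · exact Or.inl (lt_trans hk h1)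
        · exact Or.inl (h1 ▸ hk)
    · rw [if_neg hk]
      refine List.Pairwise.cons ?_ (ih hp.tail (fun a ha => hlt a (List.mem_cons_of_mem y ha)))
      intro z hz
      rcases (PySem.List.mem_insertBy _ _ _ _).mp hz with rfl | hz'
      · by_cases he : key y < key z
        · exact Or.inl he
        · exact Or.inr ⟨le_antisymm (not_lt.mp hk) (not_lt.mp he), hlt y (List.mem_cons_self)⟩
      · exact List.rel_of_pairwise_cons hp hz'

lemma sorted_stable (xs : List Int) (key : Int → Int) (hx : xs.Pairwise (· < ·)) :
    (PySem.List.sorted xs key false).Pairwise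
      (fun a b => key a < key b ∨ (key a = key b ∧ a < b)) := by
  rw [PySem.List.sorted_eq_foldl_insertBy]
  suffices h : ∀ (ys acc : List Int),
      acc.Pairwise (fun a b => key a < key b ∨ (key a = key b ∧ a < b)) →
      (∀ a ∈ acc, ∀ b ∈ ys, a < b) → ys.Pairwise (· < ·) →
      (ys.foldl (fun acc x => PySem.List.insertBy (fun a b => decide (key a < key b)) x acc)
          acc).Pairwise (fun a b => key a < key b ∨ (key a = key b ∧ a < b)) by
    exact h xs [] (by simp) (by simp) hx
  intro ys
  induction ys with
  | nil => intro acc hacc _ _; simpa using hacc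
  | cons x t ih =>
    intro acc hacc hcross hys
    simp only [List.foldl_cons]
    refine ih _ (insertBy_pairwise key x acc hacc
        (fun a ha => hcross a ha x List.mem_cons_self)) ?_ hys.tail
    intro a ha b hb
    rcases (PySem.List.mem_insertBy _ _ _ _).mp ha with rfl | ha'
    · exact List.rel_of_pairwise_cons hys hb
    · exact hcross a ha' b (List.mem_cons_of_mem x hb)

lemma enum_spec : ∀ (arr : List Int) (s : Int),
    (PySem.List.enumerate arr s).map (fun iv => (iv.2, iv.1)) =
      (List.range arr.length).map (fun k => (arr.getD k 0, s + (k : Int))) := by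
  intro arr
  induction arr with
  | nil => intro s; rfl
  | cons x t ih =>
    intro s
    show (s, x).swap :: (PySem.List.enumerate t (s + 1)).map (fun iv => (iv.2, iv.1)) = _
    rw [ih (s + 1), List.length_cons, List.range_succ_eq_map, List.map_cons, List.map_map]
    refine congrArg₂ _ (by simp [Prod.swap]) ?_
    apply List.map_congr_left
    intro k _
    simp only [Function.comp_apply, List.getD_cons_succ, Nat.succ_eq_add_one]
    refine congrArg₂ _ rfl ?_
    push_cast
    ring

-- ===== VERDICT (by name: the statement is the Claim_ definition above) =====
theorem radixsort_spec : Claim_equal_radixsort := by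
  intro arr _ hpre
  unfold Spec_radixsort
  by_cases hnil : arr.length = 0
  · unfold radixsort radixsort_alt
    rw [if_pos hnil, if_pos hnil]
  · have hneg : ¬ (arr.any (fun x => decide (x < 0)) = true) := by
      simp only [List.any_eq_true, not_exists]
      intro x
      rintro ⟨hx, hlt⟩
      have := hpre x hx
      simp at hlt
      omega
    unfold radixsort radixsort_alt
    rw [if_neg hnil, if_neg hnil, if_neg hneg, if_neg hneg]
    show (radixLoop ((PySem.List.enumerate arr 0).map (fun iv => (iv.2, iv.1)))
        ((PySem.List.max? (((PySem.List.enumerate arr 0).map (fun iv => (iv.2, iv.1))).map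
            (fun p => p.1)) (fun v => v)).getD 0) 1).map (fun p => p.2)
      = PySem.List.sorted (PySem.List.pyRange 0 (arr.length : Int) 1)
          (fun i => PySem.List.pyGetD arr i 0) false
    set indexed := (PySem.List.enumerate arr 0).map (fun iv => (iv.2, iv.1)) with hidx
    set maxVal := (PySem.List.max? (indexed.map (fun p => p.1)) (fun v => v)).getD 0 with hmaxdef
    have hindexed : indexed = (List.range arr.length).map (fun k => (arr.getD k 0, (k : Int))) := by
      rw [hidx, enum_spec arr 0]
      apply List.map_congr_left
      intro k _
      simp
    -- elements of indexed
    have hmemI : ∀ p ∈ indexed, ∃ k : Nat, k < arr.length ∧ p = (arr.getD k 0, (k : Int)) := by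
      intro p hp
      rw [hindexed] at hp
      rcases List.mem_map.mp hp with ⟨k, hk, rfl⟩
      exact ⟨k, List.mem_range.mp hk, rfl⟩
    have hIne : indexed.map (fun p => p.1) ≠ [] := by
      rw [hindexed, List.map_map]
      intro hcon
      have h1 := congrArg List.length hcon
      rw [List.length_map, List.length_range] at h1
      simp at h1
      exact hnil (by rw [h1]; rfl)
    have hmaxb : ∀ p ∈ indexed, p.1 ≤ maxVal := by
      intro p hp
      cases hm : PySem.List.max? (indexed.map (fun p => p.1)) (fun v => v) with
      | none => exact absurd ((PySem.List.max?_eq_none_iff _ _).mp hm) hIne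
      | some m =>
        have := PySem.List.max?_isMax hm p.1 (List.mem_map_of_mem hp)
        rw [hmaxdef, hm]
        simpa using this
    have hb : ∀ p ∈ indexed, 0 ≤ p.1 ∧ p.1 ≤ maxVal := by
      intro p hp
      refine ⟨?_, hmaxb p hp⟩
      rcases hmemI p hp with ⟨k, hk, rfl⟩
      have : arr.getD k 0 ∈ arr := by
        rw [List.getD_eq_getElem arr 0 hk]
        exact List.getElem_mem hk
      exact hpre _ this
    have hp1 : indexed.Pairwise (lexE 1) := by
      rw [hindexed, List.pairwise_map]
      refine List.pairwise_lt_range.imp ?_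
      intro a b hab
      unfold lexE
      have hm1 : ∀ v : Int, PySem.Int.mod v 1 = 0 := fun v => by
        rw [PySem.Int.mod_eq_emod_of_pos one_pos]; exact Int.emod_one v
      refine Or.inr ⟨by rw [hm1, hm1], ?_⟩
      simp only
      exact_mod_cast hab
    obtain ⟨hperm, hpair⟩ := radixLoop_spec indexed maxVal 1 one_pos hb hp1
    -- compare through the strict index order
    have hmemA : ∀ p ∈ radixLoop indexed maxVal 1, p.1 = PySem.List.pyGetD arr p.2 0 := by
      intro p hp
      rcases hmemI p (hperm.mem_iff.mp hp) with ⟨k, hk, rfl⟩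
      simp only
      rw [PySem.List.pyGetD_natCast]
    have hpairL1 : ((radixLoop indexed maxVal 1).map (fun p => p.2)).Pairwise
        (fun a b => PySem.List.pyGetD arr a 0 < PySem.List.pyGetD arr b 0 ∨
          (PySem.List.pyGetD arr a 0 = PySem.List.pyGetD arr b 0 ∧ a < b)) := by
      rw [List.pairwise_map]
      refine hpair.imp_of_mem ?_
      intro p q hpm hqm hlex
      rw [← hmemA p hpm, ← hmemA q hqm]
      exact hlex
    have hidxs : PySem.List.pyRange 0 (arr.length : Int) 1 =
        (List.range arr.length).map (fun k : Nat => (k : Int)) := PySem.List.pyRange_zero_natCast _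
    have hpairL2 : (PySem.List.sorted (PySem.List.pyRange 0 (arr.length : Int) 1)
        (fun i => PySem.List.pyGetD arr i 0) false).Pairwise
        (fun a b => PySem.List.pyGetD arr a 0 < PySem.List.pyGetD arr b 0 ∨
          (PySem.List.pyGetD arr a 0 = PySem.List.pyGetD arr b 0 ∧ a < b)) := by
      apply sorted_stable
      rw [hidxs, List.pairwise_map]
      refine List.pairwise_lt_range.imp ?_
      intro a b hab
      exact_mod_cast hab
    have hpermL : ((radixLoop indexed maxVal 1).map (fun p => p.2)).Perm
        (PySem.List.sorted (PySem.List.pyRange 0 (arr.length : Int) 1)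
          (fun i => PySem.List.pyGetD arr i 0) false) := by
      refine (hperm.map (fun p => p.2)).trans ?_
      refine List.Perm.trans ?_ (PySem.List.sorted_perm _ _ _).symm
      rw [hindexed, hidxs, List.map_map]
      exact List.Perm.refl _
    exact List.Perm.eq_of_pairwise
      (by
        intro a b _ _ hab hba
        rcases hab with h1 | ⟨h1, h2⟩ <;> rcases hba with h3 | ⟨h3, h4⟩ <;> omega)
      hpairL1 hpairL2 hpermL
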